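-- pv_equiv track=rewrite | github.com/erikthomasson/Python | labb3ex/ex23.py | func
-- ===== SOURCE A (Python) =====
-- def func(word):
--     word=word.lower()
--     if word == "":
--         return True
--     if word[0] == word[-1]:
--         word= word[1:-1]
--         return func(word)
--     return False
-- ===== SOURCE B (Python) =====
-- def func(word):
--     w = word.lower()
--     return w == w[::-1]
-- ===== Notes on version B (the rewrite author's own statement) =====
-- stated objective: faster
-- what changed: Replaced the recursion that re-lowercases and re-slices the string at every step (quadratic: each word[1:-1] copies the string) with a single lowercase pass and one reversed-copy comparison.
import Mathlib
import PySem

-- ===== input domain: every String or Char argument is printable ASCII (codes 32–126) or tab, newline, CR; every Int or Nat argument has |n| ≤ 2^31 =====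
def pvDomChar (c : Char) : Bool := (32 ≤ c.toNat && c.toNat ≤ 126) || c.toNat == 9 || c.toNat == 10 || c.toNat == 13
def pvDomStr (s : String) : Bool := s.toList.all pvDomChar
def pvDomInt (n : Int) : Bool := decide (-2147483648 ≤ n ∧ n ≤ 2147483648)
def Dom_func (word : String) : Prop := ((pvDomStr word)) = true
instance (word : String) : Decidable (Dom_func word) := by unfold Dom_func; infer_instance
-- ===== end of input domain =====

-- B replaces A's quadratic lower-and-slice recursion with one lowercase pass and a reversed-copy comparison.

-- ===== PORT A =====
-- termination helper for the port of A (cited in decreasing_by)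
theorem funcAux_dec (cs : List Char) (h : ¬ PySem.Chars.lower cs = []) :
    (PySem.List.slice (PySem.Chars.lower cs) (some 1) (some (-1))).length < cs.length := by
  have hlen : (PySem.Chars.lower cs).length = cs.length := by
    simp [PySem.Chars.lower]
  have hne : cs ≠ [] := by
    intro hc; simp [hc, PySem.Chars.lower] at h
  have hpos : 0 < cs.length := List.length_pos_iff.mpr hne
  rw [PySem.List.length_slice, hlen]
  simp [PySem.List.clampIdx, hne]
  omega

-- A recurses on the string; ported on the char-list side (PySem.Str functions are list wrappers)
def funcAux (cs : List Char) : Bool :=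
  if PySem.Chars.lower cs = [] then true
  else if PySem.List.pyGet? (PySem.Chars.lower cs) 0 = PySem.List.pyGet? (PySem.Chars.lower cs) (-1) then
    funcAux (PySem.List.slice (PySem.Chars.lower cs) (some 1) (some (-1)))
  else false
termination_by cs.length
decreasing_by exact funcAux_dec cs (by assumption)

def func (word : String) : Bool := funcAux word.toList

-- ===== PORT B =====
-- w[::-1] is the reversed list (PySem.List.slice?_none_none_neg_one); '==' is Python's string equality
def func_alt (word : String) : Bool :=
  PySem.Chars.lower word.toList == (PySem.Chars.lower word.toList).reverse

-- ===== PRECONDITION & SPEC =====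
def Spec_func (word : String) (out : Bool) : Prop := out = func_alt word
instance (word : String) (out : Bool) : Decidable (Spec_func word out) := by unfold Spec_func; infer_instance

-- ===== CLAIM (what is proved, stated in full; the proofs are below) =====
def Claim_equal_func : Prop := ∀ (word : String), Dom_func word → Spec_func word (func word)

-- ===== LEMMAS AND PROOFS =====
theorem char_le_iff (a b : Char) : a ≤ b ↔ a.toNat ≤ b.toNat := by
  rw [Char.le_def, UInt32.le_iff_toNat_le]; rfl

theorem lowerChar_idem (c : Char) : PySem.Chars.lowerChar (PySem.Chars.lowerChar c) = PySem.Chars.lowerChar c := by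
  unfold PySem.Chars.lowerChar PySem.Chars.isupper
  split_ifs with h1 h2
  · exfalso
    simp only [Bool.and_eq_true, decide_eq_true_eq, char_le_iff] at h1 h2
    have hA : ('A' : Char).toNat = 65 := rfl
    have hZ : ('Z' : Char).toNat = 90 := rfl
    have hv : (c.toNat + 32).isValidChar := by
      constructor; omega
    have ht : (Char.ofNat (c.toNat + 32)).toNat = c.toNat + 32 := by
      rw [Char.toNat_ofNat, if_pos hv]
    omega
  · rfl
  · rfl

theorem lower_fixed_of_mem (cs m : List Char) (hm : ∀ x ∈ m, x ∈ PySem.Chars.lower cs) :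
    PySem.Chars.lower m = m := by
  unfold PySem.Chars.lower at *
  induction m with
  | nil => rfl
  | cons x xs ihx =>
    obtain ⟨y, _, hy⟩ := List.mem_map.mp (hm x (by simp))
    simp only [List.map_cons, List.cons.injEq]
    exact ⟨by rw [← hy]; exact lowerChar_idem y,
           ihx (fun z hz => hm z (by simp [hz]))⟩

theorem slice_mid (a b : Char) (m : List Char) :
    PySem.List.slice (a :: (m ++ [b])) (some 1) (some (-1)) = m := by
  have hnn : ¬((m.length : Int) + 1 < 0) := by omega
  simp [PySem.List.slice, PySem.List.clampIdx, hnn]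

theorem funcAux_eq (n : Nat) : ∀ cs : List Char, cs.length ≤ n →
    funcAux cs = (PySem.Chars.lower cs == (PySem.Chars.lower cs).reverse) := by
  induction n with
  | zero =>
    intro cs h
    have : cs = [] := List.eq_nil_of_length_eq_zero (Nat.le_zero.mp h)
    subst this
    rw [funcAux]; simp [PySem.Chars.lower]
  | succ n ih =>
    intro cs h
    rw [funcAux]
    by_cases h0 : PySem.Chars.lower cs = []
    · simp [h0]
    · obtain ⟨a, t, hw⟩ := List.exists_cons_of_ne_nil h0
      rcases List.eq_nil_or_concat t with rfl | ⟨m, b, hmt⟩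
      · -- lowered word is a singleton [a]
        rw [if_neg h0, hw]
        simp only [PySem.List.pyGet?_zero_cons, PySem.List.pyGet?_neg_one,
          List.getLast?_singleton]
        have hs : PySem.List.slice [a] (some 1) (some (-1)) = ([] : List Char) := by
          simp [PySem.List.slice, PySem.List.clampIdx]
        rw [hs, funcAux]
        simp [PySem.Chars.lower]
      · -- lowered word is a :: m ++ [b]
        simp only [List.concat_eq_append] at hmt
        subst hmt
        rw [if_neg h0, hw]
        rw [PySem.List.pyGet?_zero_cons, PySem.List.pyGet?_neg_one]
        have hlast : (a :: (m ++ [b])).getLast? = some b := by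
          clear hw h0 h ih
          induction m generalizing a with
          | nil => rfl
          | cons x xs ihx => rw [List.cons_append, List.getLast?_cons_cons]; exact ihx x
        rw [hlast]
        by_cases hab : a = b
        · subst hab
          rw [if_pos rfl, slice_mid]
          have hmlow : PySem.Chars.lower m = m :=
            lower_fixed_of_mem cs m (by rw [hw]; intro x hx; simp [hx])
          have hmlen : m.length ≤ n := by
            have hl : (PySem.Chars.lower cs).length = cs.length := by simp [PySem.Chars.lower]
            rw [hw] at hl; simp at hl; omega
          rw [ih m hmlen, hmlow]
          apply Bool.eq_iff_iff.mpr
          simp only [beq_iff_eq]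
          constructor
          · intro hmm
            simp [List.reverse_cons, ← hmm]
          · intro hww
            simp only [List.reverse_cons, List.reverse_append, List.reverse_cons,
              List.reverse_nil, List.nil_append, List.cons_append, List.cons.injEq] at hww
            exact List.append_cancel_right hww.2
        · rw [if_neg (by simpa using hab)]
          symm
          apply beq_eq_false_iff_ne.mpr
          intro hww
          apply hab
          have h2 : ((a :: (m ++ [b])).reverse).head? = some b := by
            simp [List.reverse_cons]
          rw [← hww] at h2
          simpa using h2

-- ===== VERDICT (by name: the statement is the Claim_ definition above) =====
theorem func_spec : Claim_equal_func := by
  intro word _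
  unfold Spec_func func func_alt
  exact funcAux_eq word.toList.length word.toList le_rfl
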